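-- pv_equiv track=rewrite | github.com/machadinhos/adventofcode | src/adventofcode/year_2024/day_9/part_2.py | get_dot_len_index
-- ===== SOURCE A (Python) =====
-- def get_dot_len_index(input_data: list[str]) -> list[(int, int)]:
--     dots = []
--     current_dot_start_index = input_data.index(".")
--     i = current_dot_start_index
--     while i < len(input_data):
--         if input_data[i] != ".":
--             dots.append((i - current_dot_start_index, current_dot_start_index))
--             while i < len(input_data) and input_data[i] != ".":
--                 i += 1
--             current_dot_start_index = i
--         i += 1
--     return sorted(dots, key=lambda x: x[1])
-- ===== SOURCE B (Python) =====
-- def get_dot_len_index(input_data):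
--     # One forward pass with a run-start marker; no nested scan, no sort.
--     runs = []
--     start = None
--     for i, ch in enumerate(input_data):
--         if ch == ".":
--             if start is None:
--                 start = i
--         elif start is not None:
--             runs.append((i - start, start))
--             start = None
--     return runs
-- ===== Notes on version B (the rewrite author's own statement) =====
-- stated objective: simpler
-- what changed: Replaces the nested while-loops with index arithmetic plus a final sort by a single enumerate pass keeping an optional run-start marker; the trailing dot-run is dropped naturally because a run is only emitted when a non-dot terminates it, and no sort is needed since runs are emitted in start order.
import Mathlib
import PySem

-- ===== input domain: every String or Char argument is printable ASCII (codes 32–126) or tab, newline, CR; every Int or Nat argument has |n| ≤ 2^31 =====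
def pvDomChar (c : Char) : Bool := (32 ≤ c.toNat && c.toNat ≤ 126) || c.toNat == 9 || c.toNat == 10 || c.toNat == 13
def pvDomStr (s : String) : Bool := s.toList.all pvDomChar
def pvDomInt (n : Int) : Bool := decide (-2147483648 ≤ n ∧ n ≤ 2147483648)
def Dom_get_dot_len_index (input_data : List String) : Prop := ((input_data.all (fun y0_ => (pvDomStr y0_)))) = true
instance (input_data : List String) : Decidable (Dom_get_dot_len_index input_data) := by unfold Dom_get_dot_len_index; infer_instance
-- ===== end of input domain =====

-- B replaces A's nested index-juggling while-loops and final sort by one enumerate pass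
-- with an optional run-start marker (objective: simpler; return value only, no mutation).

-- ===== PORT A =====
-- inner `while i < len(input_data) and input_data[i] != ".": i += 1`
def pvSkip (xs : List String) (i : Nat) : Nat :=
  if i < xs.length then
    if PySem.List.pyGetD xs (i : Int) "" ≠ "." then pvSkip xs (i + 1) else i
  else i
termination_by xs.length - i

theorem pvSkip_ge (xs : List String) (i : Nat) : i ≤ pvSkip xs i := by
  fun_induction pvSkip xs i with
  | case1 i h1 h2 ih => omega
  | case2 => omega
  | case3 => omega

-- outer while loop of A; state (i, current_dot_start_index, dots)
def pvLoopA (xs : List String) (i cds : Nat) (dots : List (Int × Int)) : List (Int × Int) :=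
  if i < xs.length then
    if PySem.List.pyGetD xs (i : Int) "" ≠ "." then
      pvLoopA xs (pvSkip xs i + 1) (pvSkip xs i)
        (dots ++ [((i : Int) - (cds : Int), (cds : Int))])
    else
      pvLoopA xs (i + 1) cds dots
  else dots
termination_by xs.length - i
decreasing_by
  · have := pvSkip_ge xs i; omega
  · omega

def get_dot_len_index (input_data : List String) : List (Int × Int) :=
  match PySem.List.index? input_data "." with
  | none => []   -- Python's list.index raises ValueError here; excluded by Pre_
  | some k => PySem.List.sorted (pvLoopA input_data k k []) (fun x => x.2) false

-- ===== PORT B =====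
-- single pass over enumerate(input_data) with an optional run-start marker
def pvLoopB (ps : List (Int × String)) (start : Option Int)
    (runs : List (Int × Int)) : List (Int × Int) :=
  match ps with
  | [] => runs
  | (i, ch) :: rest =>
    if ch = "." then
      match start with
      | none => pvLoopB rest (some i) runs
      | some s => pvLoopB rest (some s) runs
    else
      match start with
      | some s => pvLoopB rest none (runs ++ [(i - s, s)])
      | none => pvLoopB rest none runs

def get_dot_len_index_alt (input_data : List String) : List (Int × Int) :=
  pvLoopB (PySem.List.enumerate input_data) none []

-- ===== PRECONDITION & SPEC =====
-- Pre_ excludes inputs without a "." : there A raises ValueError (list.index).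
def Pre_get_dot_len_index (input_data : List String) : Prop := "." ∈ input_data
instance (input_data : List String) : Decidable (Pre_get_dot_len_index input_data) := by
  unfold Pre_get_dot_len_index; infer_instance

def pvWitness_get_dot_len_index : List String := ["x", ".", ".", "y", "."]

def Spec_get_dot_len_index (input_data : List String) (out : List (Int × Int)) : Prop :=
  out = get_dot_len_index_alt input_data
instance (input_data : List String) (out : List (Int × Int)) :
    Decidable (Spec_get_dot_len_index input_data out) := by
  unfold Spec_get_dot_len_index; infer_instance

-- ===== CLAIM (what is proved, stated in full; the proofs are below) =====
def Claim_equal_get_dot_len_index : Prop := ∀ (input_data : List String), Dom_get_dot_len_index input_data → Pre_get_dot_len_index input_data → Spec_get_dot_len_index input_data (get_dot_len_index input_data)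

-- ===== LEMMAS AND PROOFS =====

-- reference: the dot runs of the suffix `t` of the input starting at absolute index i,
-- with s = start of the currently open dot run (if any)
def pvRunsSuf (t : List String) (i : Nat) (s : Option Nat) : List (Int × Int) :=
  match t with
  | [] => []
  | ch :: rest =>
    if ch = "." then pvRunsSuf rest (i + 1) (some (s.getD i))
    else
      match s with
      | some v => ((i : Int) - (v : Int), (v : Int)) :: pvRunsSuf rest (i + 1) none
      | none => pvRunsSuf rest (i + 1) none

theorem pvGetD_eq (xs : List String) (i : Nat) (h : i < xs.length) :
    PySem.List.pyGetD xs (i : Int) "" = xs[i] := by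
  simp [PySem.List.pyGetD_natCast, List.getD_eq_getElem?_getD, List.getElem?_eq_getElem h]

-- every emitted start is ≥ the open-run start (resp. current index)
theorem pvRunsSuf_lb (t : List String) (i : Nat) (s : Option Nat)
    (hs : ∀ v, s = some v → v ≤ i) :
    ∀ p ∈ pvRunsSuf t i s, ((s.getD i : Nat) : Int) ≤ p.2 := by
  induction t generalizing i s with
  | nil => simp [pvRunsSuf]
  | cons ch rest ih =>
    intro p hp
    by_cases hdot : ch = "."
    · simp only [pvRunsSuf, if_pos hdot] at hp
      have hle : s.getD i ≤ i := by cases s with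
        | none => simp
        | some v => exact hs v rfl
      have := ih (i + 1) (some (s.getD i)) (by intro v hv; cases hv; omega) p hp
      simpa using this
    · cases s with
      | some v =>
        simp only [pvRunsSuf, if_neg hdot, List.mem_cons] at hp
        rcases hp with hp | hp
        · simp [hp]
        · have := ih (i + 1) none (by simp) p hp
          have hvi : v ≤ i := hs v rfl
          simp only [Option.getD] at this ⊢
          omega
      | none =>
        simp only [pvRunsSuf, if_neg hdot] at hp
        have := ih (i + 1) none (by simp) p hp
        simp only [Option.getD] at this ⊢
        omega

theorem pvRunsSuf_pairwise (t : List String) (i : Nat) (s : Option Nat)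
    (hs : ∀ v, s = some v → v ≤ i) :
    (pvRunsSuf t i s).Pairwise (fun a b => a.2 < b.2) := by
  induction t generalizing i s with
  | nil => simp [pvRunsSuf]
  | cons ch rest ih =>
    by_cases hdot : ch = "."
    · have hle : s.getD i ≤ i := by cases s with
        | none => simp
        | some v => exact hs v rfl
      simp only [pvRunsSuf, if_pos hdot]
      exact ih (i + 1) (some (s.getD i)) (by intro v hv; cases hv; omega)
    · cases s with
      | some v =>
        simp only [pvRunsSuf, if_neg hdot, List.pairwise_cons]
        refine ⟨?_, ih (i + 1) none (by simp)⟩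
        intro p hp
        have hlb := pvRunsSuf_lb rest (i + 1) none (by simp) p hp
        have hvi : v ≤ i := hs v rfl
        simp only [Option.getD] at hlb
        show (v : Int) < p.2
        omega
      | none =>
        simp only [pvRunsSuf, if_neg hdot]
        exact ih (i + 1) none (by simp)

-- skipping a non-dot block and then opening the run at the stop point preserves the runs
theorem pvRunsSuf_skip (xs : List String) (i : Nat) :
    pvRunsSuf (xs.drop i) i none
      = pvRunsSuf (xs.drop (pvSkip xs i + 1)) (pvSkip xs i + 1) (some (pvSkip xs i)) := by
  fun_induction pvSkip xs i with
  | case1 i h1 h2 ih =>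
    rw [← ih]
    rw [List.drop_eq_getElem_cons h1]
    rw [pvGetD_eq xs i h1] at h2
    simp [pvRunsSuf, h2]
  | case2 i h1 h2 =>
    rw [List.drop_eq_getElem_cons h1]
    rw [pvGetD_eq xs i h1] at h2
    have hdot : xs[i] = "." := by by_contra hc; exact h2 hc
    simp [pvRunsSuf, hdot]
  | case3 i h1 =>
    rw [List.drop_eq_nil_of_le (by omega), List.drop_eq_nil_of_le (by omega)]
    simp [pvRunsSuf]

theorem pvLoopA_eq (xs : List String) (i cds : Nat) (dots : List (Int × Int)) :
    pvLoopA xs i cds dots = dots ++ pvRunsSuf (xs.drop i) i (some cds) := by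
  fun_induction pvLoopA xs i cds dots with
  | case1 i cds dots h1 h2 ih =>
    have hsame : pvSkip xs (i + 1) = pvSkip xs i := by
      conv_rhs => rw [pvSkip]
      rw [if_pos h1, if_pos h2]
    rw [ih]
    rw [List.drop_eq_getElem_cons h1]
    rw [pvGetD_eq xs i h1] at h2
    simp only [pvRunsSuf, if_neg h2]
    have hskip := pvRunsSuf_skip xs (i + 1)
    rw [hsame] at hskip
    rw [← hskip]
    simp
  | case2 i cds dots h1 h2 ih =>
    rw [ih]
    rw [List.drop_eq_getElem_cons h1]
    rw [pvGetD_eq xs i h1] at h2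
    have hdot : xs[i] = "." := by by_contra hc; exact h2 hc
    simp [pvRunsSuf, hdot]
  | case3 i cds dots h1 =>
    rw [List.drop_eq_nil_of_le (by omega)]
    simp [pvRunsSuf]

-- B's loop over the enumerated suffix computes the same runs
def pvNatStart : Option Nat → Option Int
  | none => none
  | some v => some (v : Int)

theorem pvLoopB_eq (t : List String) (i : Nat) (s : Option Nat)
    (runs : List (Int × Int)) :
    pvLoopB (PySem.List.enumerate t (i : Int)) (pvNatStart s) runs
      = runs ++ pvRunsSuf t i s := by
  induction t generalizing i s runs with
  | nil => simp [PySem.List.enumerate_nil, pvLoopB, pvRunsSuf]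
  | cons ch rest ih =>
    rw [PySem.List.enumerate_cons]
    have hcast : (i : Int) + 1 = ((i + 1 : Nat) : Int) := by push_cast; ring
    by_cases hdot : ch = "."
    · cases s with
      | none =>
        simp only [pvNatStart, pvLoopB, if_pos hdot]
        rw [hcast]
        have := ih (i + 1) (some i) runs
        simp only [pvNatStart] at this
        rw [this]
        simp [pvRunsSuf, hdot]
      | some v =>
        simp only [pvNatStart, pvLoopB, if_pos hdot]
        rw [hcast]
        have := ih (i + 1) (some v) runs
        simp only [pvNatStart] at this
        rw [this]
        simp [pvRunsSuf, hdot]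
    · cases s with
      | none =>
        simp only [pvNatStart, pvLoopB, if_neg hdot]
        rw [hcast]
        have := ih (i + 1) none runs
        simp only [pvNatStart] at this
        rw [this]
        simp [pvRunsSuf, hdot]
      | some v =>
        simp only [pvNatStart, pvLoopB, if_neg hdot]
        rw [hcast]
        have := ih (i + 1) none (runs ++ [((i : Int) - (v : Int), (v : Int))])
        simp only [pvNatStart] at this
        rw [this]
        simp [pvRunsSuf, hdot]

-- walking from 0 over the dot-free prefix up to the first dot k
theorem pvRunsSuf_prefix (xs : List String) (k : Nat) (hk : k < xs.length)
    (hkdot : xs[k] = ".") (hpre : ∀ j (hj : j < k), xs[j] ≠ ".") :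
    ∀ i, i ≤ k → (pvRunsSuf (xs.drop i) i none
      = pvRunsSuf (xs.drop (k + 1)) (k + 1) (some k)) := by
  intro i hik
  induction hn : k - i generalizing i with
  | zero =>
    have hik' : i = k := by omega
    subst hik'
    rw [List.drop_eq_getElem_cons hk]
    simp [pvRunsSuf, hkdot]
  | succ n ihn =>
    have hikl : i < k := by omega
    have hil : i < xs.length := by omega
    rw [List.drop_eq_getElem_cons hil]
    simp only [pvRunsSuf, if_neg (hpre i hikl)]
    exact ihn (i + 1) (by omega) (by omega)

-- ===== VERDICT (by name: the statement is the Claim_ definition above) =====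
theorem get_dot_len_index_spec : Claim_equal_get_dot_len_index := by
  intro xs _ hpre
  unfold Spec_get_dot_len_index get_dot_len_index get_dot_len_index_alt
  have hsome : ∃ k, PySem.List.index? xs "." = some k := by
    have := (PySem.List.index?_isSome_iff (xs := xs) (v := ".")).2 hpre
    exact Option.isSome_iff_exists.1 this
  obtain ⟨k, hk⟩ := hsome
  obtain ⟨hklen, hkdot, hpre'⟩ := PySem.List.getElem_of_index?_eq_some hk
  rw [hk]
  dsimp only
  rw [pvLoopA_eq, List.nil_append]
  -- B's side
  have hB := pvLoopB_eq xs 0 none []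
  simp only [pvNatStart, Nat.cast_zero, List.nil_append] at hB
  rw [hB]
  -- prefix walk: runs from 0 equal runs from k with the run open at k
  have hwalk := pvRunsSuf_prefix xs k hklen hkdot hpre' 0 (Nat.zero_le k)
  rw [List.drop_zero] at hwalk
  rw [hwalk]
  have hstep : pvRunsSuf (xs.drop k) k (some k)
      = pvRunsSuf (xs.drop (k + 1)) (k + 1) (some k) := by
    rw [List.drop_eq_getElem_cons hklen]
    simp [pvRunsSuf, hkdot]
  rw [hstep]
  -- already sorted by start
  have hpair := pvRunsSuf_pairwise (xs.drop (k + 1)) (k + 1) (some k)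
    (by intro v hv; cases hv; omega)
  exact PySem.List.sorted_eq_self_of_pairwise
    (pvRunsSuf (xs.drop (k + 1)) (k + 1) (some k)) (fun x => x.2)
    (hpair.imp (fun h => le_of_lt h))
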